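/-
  THE SPLIT OF `stb_vorbis_get_frame_float` (93 instructions, 0x1196c0 … 0x119875; stb_vorbis_fixed.c 5098–5117) INTO SIX SEGMENTS.

  The function's contract `Vorbis.Spec.stb_vorbis_get_frame_float.spec` is in Vorbis/Spec/Top.lean. This file holds
    PART 1: general lemmas of the family (from the worker of the whole function): the inline shadow stores of the PROTECTED frame's
            prologue / epilogue as `storesMem … F.prologue / F.epilogue` (`gff_prologue_mem`, `gff_epilogue_mem`) and the shadow layer over them
            (`gff_prologue_inv`, `gff_epilogue_inv`), the three objects of the frame (`gff_frameObj_live`), the decode-time invariant over the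
            function's own stores (`OwnSpan`, `decodeInv_stores`), where `*f` and the arena are (`gff_obj_where`, `gff_arena_where`), the nine
            stack slots read through the prologue's store nest (`gff_prologue_slots`);
    PART 2: the assertions at the cut points, all relative to the function's entry state `u`, ghost `f` = the decoder object:
            `GFrame` (what every cut point shares, the epilogue's head included) ⊂ `GBody` (+ rbx, the two spilled arguments),
            `AtCut1` (0x119737 = `cut1`, after vorbis_decode_packet), `AtCut2 left r` (0x1197a7 = `cut2`, after vorbis_finish_frame),
            `AtLoop left r ch i` (0x1197f5 = `loop1`), `AtStores left r ch` (0x119806 = `at_119806`, the loop's exit),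
            `AtEpi r` (0x119769 = `at_119769`, the single epilogue: the zero path and the normal path join);
    PART 3: the claims `Seg1 … Seg6` of the units `stb_vorbis_get_frame_float.1 … .6`. The loop is ONE ROUND (segment 4: head at `i` → head at
            `i + 1` | the exit); the induction on `ch − i` is the composition's (unit `stb_vorbis_get_frame_float.COMPOSITION`).

  The stack frame (steady `rsp` = `R − 184`, `R` = the entry rsp: six pushes and `sub rsp, 88H`), offsets from `R`:
    −176 `[rsp+8]` channels    −168 `[rsp+10H]` output    −156 `[rsp+1CH]` a copy of the result `len`
    −152 `[rsp+20H]` THE PROTECTED FRAME's base (magic, description, function; r14 = (R − 152) >> 3 indexes its shadow)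
    −120 `[rsp+40H]` len (object +32)    −104 `[rsp+50H]` right (object +48)    −88 `[rsp+60H]` left (object +64)
    −48 … −8 the saved rbx rbp r12 r13 r14 r15    0 the return address.
-/
import Asan.CheckWalk
import Vorbis.Spec.Top
import Vorbis.Frames
import Vorbis.LabelsAt

open X86 X86.User Asan Vorbis Vorbis.Spec

set_option maxRecDepth 4000
set_option maxHeartbeats 4000000

namespace Vorbis.Spec.stb_vorbis_get_frame_float

/-! ### PART 1. General lemmas -/

/-- The protected frame of this function (base = RA − 152, objects `len` +32, `right` +48, `left` +64). -/
abbrev ownFL : FrameLayout := Vorbis.Frames.stb_vorbis_get_frame_float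

/-- The shadow address of granule `k` of the frame at `sp - 152`, in the form the walker writes it
(`shr r14, 3 ; mov [r14 + 0xc0000k], …`). -/
theorem gff_shadowAddr_frame (sp : Word) (k : Nat) (hk : k < 16) (hlo : 0x700000 + 4240 ≤ sp.toNat)
    (hhi : sp.toNat + 8 ≤ 0x800000) :
    shadowAddr ((sp.toNat - 152) / 8 + k) = (sp - 152) >>> 3 + UInt64.ofNat (12582912 + k) := by
  unfold shadowAddr
  apply UInt64.toNat_inj.mp
  u_omega

/-- The three shadow stores of the prologue (0x119702, 0x11970d, 0x119718) are `storesMem … ownFL.prologue`. -/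
theorem gff_prologue_mem (m : Mem) (sp : Word) (hlo : 0x700000 + 4240 ≤ sp.toNat) (hhi : sp.toNat + 8 ≤ 0x800000) :
    storesMem m ((sp.toNat - 152) / 8) ownFL.prologue =
      ((m.writeLE ((sp - 152) >>> 3 + 12582912) 4 4059165169).writeLE ((sp - 152) >>> 3 + 12582916) 4
        4060410372).writeLE ((sp - 152) >>> 3 + 12582920) 4 4092850948 := by
  have e0 := gff_shadowAddr_frame sp 0 (by decide) hlo hhi
  have e4 := gff_shadowAddr_frame sp 4 (by decide) hlo hhi
  have e8 := gff_shadowAddr_frame sp 8 (by decide) hlo hhi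
  simp only [storesMem, ownFL, Vorbis.Frames.stb_vorbis_get_frame_float, List.foldl]
  rw [e0, e4, e8]
  rfl

/-- The two shadow stores of the epilogue (0x119769, 0x119774) are `storesMem … ownFL.epilogue`. -/
theorem gff_epilogue_mem (m : Mem) (sp : Word) (hlo : 0x700000 + 4240 ≤ sp.toNat) (hhi : sp.toNat + 8 ≤ 0x800000) :
    storesMem m ((sp.toNat - 152) / 8) ownFL.epilogue =
      (m.writeLE ((sp - 152) >>> 3 + 12582912) 8 0).writeLE ((sp - 152) >>> 3 + 12582920) 4 0 := by
  have e0 := gff_shadowAddr_frame sp 0 (by decide) hlo hhi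
  have e8 := gff_shadowAddr_frame sp 8 (by decide) hlo hhi
  simp only [storesMem, ownFL, Vorbis.Frames.stb_vorbis_get_frame_float, List.foldl]
  rw [e0, e8]
  rfl

/-- **The shadow layer after the prologue**: the pushes, spills and header words (`m1`, no shadow byte written) and then
the three inline shadow stores give the layer with this function's frame in front (`ShadowInv.prologue_ra`). -/
theorem gff_prologue_inv {others : List Obj} {frames : List (Nat × FrameLayout)} {m0 m1 : Mem} {sp : Word} {top' : Nat}
    (hinv : ShadowInv others frames (sp.toNat + 8) m0) (hun : ShadowUntouched m0 m1) (h8 : sp.toNat % 8 = 0)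
    (hlo : 0x700000 + 4240 ≤ sp.toNat) (hhi : sp.toNat + 8 ≤ 0x800000) (ht : top' ≤ sp.toNat - 152)
    (ht8 : top' % 8 = 0) (htlo : 0x700000 ≤ top') :
    ShadowInv others ((sp.toNat - 152, ownFL) :: frames) top'
      (((m1.writeLE ((sp - 152) >>> 3 + 12582912) 4 4059165169).writeLE ((sp - 152) >>> 3 + 12582916) 4
        4060410372).writeLE ((sp - 152) >>> 3 + 12582920) 4 4092850948) := by
  have h1 : ShadowInv others frames (sp.toNat + 8) m1 := hinv.untouched hun
  have h2 := h1.prologue_ra (F := ownFL) (top' := top') Vorbis.Frames.stb_vorbis_get_frame_float_ok h8 ht ht8 htlo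
  have e : ownFL.raOff = 152 := rfl
  rw [e, gff_prologue_mem m1 sp hlo hhi] at h2
  exact h2

/-- **The shadow layer after the epilogue's two shadow stores** (`ShadowInv.epilogue_ra`): the caller's again. -/
theorem gff_epilogue_inv {others : List Obj} {frames : List (Nat × FrameLayout)} {m : Mem} {sp : Word} {top' : Nat}
    (hinv : ShadowInv others ((sp.toNat - 152, ownFL) :: frames) top' m) (h8 : sp.toNat % 8 = 0)
    (hlo : 0x700000 + 4240 ≤ sp.toNat) (hhi : sp.toNat + 8 ≤ 0x800000)
    (hfr : ∀ bF, bF ∈ frames → sp.toNat + 8 ≤ bF.1) :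
    ShadowInv others frames (sp.toNat + 8)
      ((m.writeLE ((sp - 152) >>> 3 + 12582912) 8 0).writeLE ((sp - 152) >>> 3 + 12582920) 4 0) := by
  have h2 := ShadowInv.epilogue_ra (top := sp.toNat) (F := ownFL) hinv h8 hhi hfr
  have e : ownFL.raOff = 152 := rfl
  rw [e, gff_epilogue_mem m sp hlo hhi] at h2
  exact h2

/-- The three objects of the protected frame at `base` are live objects of the longer frame list. -/
theorem gff_frameObj_live (others : List Obj) (frames : List (Nat × FrameLayout)) (base off : Nat)
    (hoff : off = 32 ∨ off = 48 ∨ off = 64) : LiveIn others ((base, ownFL) :: frames) (base + off) 4 := by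
  refine ⟨⟨base + off, 4, .stack⟩, ?_, Nat.le_refl _, Nat.le_refl _⟩
  rw [stackObjs_cons]
  apply List.mem_append_left
  apply List.mem_append_left
  simp only [ownFL, Vorbis.Frames.stb_vorbis_get_frame_float, FrameLayout.objsAt, List.map_cons, List.map_nil,
    List.mem_cons, List.not_mem_nil, or_false]
  rcases hoff with rfl | rfl | rfl
  · exact Or.inl rfl
  · exact Or.inr (Or.inl rfl)
  · exact Or.inr (Or.inr rfl)

/-- Every live object of the caller's list is one of the longer list. -/
theorem gff_objs_sub (others : List Obj) (frames : List (Nat × FrameLayout)) (base : Nat) :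
    ∀ o, o ∈ stackObjs frames ++ others → o ∈ stackObjs ((base, ownFL) :: frames) ++ others := by
  intro o ho
  rw [stackObjs_cons, List.append_assoc]
  exact List.mem_append_right _ ho

/-- **No allocated block is touched by stores into the stack window `[lo, hi)` and the shadow region**: the blocks of the
decode-time predicate lie off the stack region (`DecodeInv.offStack`) and inside the data space (`BlkOK.inside`). -/
theorem gff_allKept_stack_shadow {others : List Obj} {frames : List (Nat × FrameLayout)} {len : Nat} {A : Arena}
    {stored room : Int} {ysz : Nat → Nat} {mem mem' : Mem} {f lo hi : Nat}
    (hdi : DecodeInv others frames len A stored room ysz mem f)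
    (hs : Mem.SameExcept [⟨lo, hi⟩, ⟨0xC00000, 0xE00000⟩] mem mem') (hlo : 0x700000 ≤ lo) (hhi : hi ≤ 0x800000) :
    AllKept (RunBlk A len) mem mem' := by
  refine AllKept.of_sameExcept hdi.ok hs ?_
  intro B hB w hw
  have h1 := hdi.offStack B hB
  have h2 := hdi.ok.inside B hB
  simp only [List.mem_cons, List.not_mem_nil, or_false] at hw
  rcases hw with rfl | rfl
  · simp only []
    omega
  · simp only []
    omega

/-- Every active frame of the caller's list lies at or above the clean region's end. -/
theorem gff_frames_above {others : List Obj} {frames : List (Nat × FrameLayout)} {top : Nat} {mem : Mem}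
    (hinv : ShadowInv others frames top mem) : ∀ bF, bF ∈ frames → top ≤ bF.1 := by
  intro bF hbF
  obtain ⟨_, _, atop, _, _⟩ := hinv.stack.active bF hbF
  exact atop


/-- **Where this function stores after the prologue** (besides the shadow): the stack region (its own frame, the callers'
out-objects `*channels`, `*output`), `outputs[·]` `[f+1000, f+1128)`, `channel_buffer_start / _end` `[f+1796, f+1804)`. -/
def OwnSpan (f : Nat) (s : Span) : Prop :=
  (0x700000 ≤ s.lo ∧ s.hi ≤ 0x800000) ∨ (f + 1000 ≤ s.lo ∧ s.hi ≤ f + 1128) ∨ (f + 1796 ≤ s.lo ∧ s.hi ≤ f + 1804)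

/-- **The decode-time invariant over this function's own stores** (`DecodeInv.frame_stores`): every span is a legal
decode-time store, and none meets a field that ADO, `Bits`, M7 or W1 read. -/
theorem decodeInv_stores {others : List Obj} {frames : List (Nat × FrameLayout)} {len : Nat} {A : Arena}
    {stored room : Int} {ysz : Nat → Nat} {m m' : Mem} {f top : Nat}
    (hdi : DecodeInv others frames len A stored room ysz m f) (hinv : ShadowInv others frames top m')
    {spans : List Span} (hs : Mem.SameExcept spans m m') (hsp : ∀ s, s ∈ spans → OwnSpan f s) :
    DecodeInv others frames len A stored room ysz m' f := by
  have hoff := hdi.objOff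
  have hbits := hdi.fb.vorbis.bits
  have hr := hbits.OBR
  simp only [voff] at hoff hr
  have hw : ∀ s, s ∈ spans → StoreOK (RunBlk A len) m f s := by
    intro s hsm
    rcases hsp s hsm with h1 | h2 | h3
    · apply StoreOK.off
      intro B hB
      have := hdi.offStack B hB
      omega
    · apply StoreOK.hole
      unfold InHole
      omega
    · apply StoreOK.hole
      unfold InHole
      omega
  have hobjEq : ∀ ws : Wins, WinsBelow ws 1808 →
      (∀ w, w ∈ ws → (w.2 ≤ 1000 ∨ 1128 ≤ w.1) ∧ (w.2 ≤ 1796 ∨ 1804 ≤ w.1)) → ObjEq ws m f m' f := by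
    intro ws hbelow hmiss
    apply ObjEq.of_sameExcept hs
    · intro w hw'
      have := hbelow w hw'
      omega
    · intro w hw' s hsm
      have hb := hbelow w hw'
      obtain ⟨k1, k2⟩ := hmiss w hw'
      rcases hsp s hsm with h1 | h2 | h3
      · omega
      · omega
      · omega
  have henv : Env (RunBlk A len) (Asan.Live (stackObjs frames ++ others)) m' := ⟨hinv.shadow.covers, hdi.ok, hdi.live⟩
  have hado : ADO A others m' f := by
    refine hdi.fb.ado.frame_stores hs (by simp only [voff]; omega) ?_ ?_
    · intro s hsm
      rcases hsp s hsm with h1 | h2 | h3 <;> omega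
    · intro s hsm
      rcases hsp s hsm with h1 | h2 | h3 <;> omega
  have hb' : Bits (RunBlk A len) len m' f :=
    hbits.transfer (hobjEq Bits.wins (by decide) (by decide)) ⟨hbits.OB1, hbits.OB1a⟩ hbits.OBR hbits.S2
  have h7 : Mdct.M7Range m' f := hdi.fb.vorbis.buffers.M7.transfer (hobjEq Mdct.M7Range.wins (by decide) (by decide))
  have hw1 : W1 m' f := hdi.fb.vorbis.w1.transfer (hobjEq W1.wins (by decide) (by decide))
  exact hdi.frame_stores hs hw henv hado (fun _ => hb') (fun _ => h7) (fun _ => hw1)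

/-- **Where `*f` is**, as one arithmetic fact: in the data space above the input, off the stack region, inside the arena's
buffer (it is a setup block of the arena: `DecodeInv.obj`). -/
theorem gff_obj_where {others : List Obj} {frames : List (Nat × FrameLayout)} {len : Nat} {A : Arena}
    {stored room : Int} {ysz : Nat → Nat} {m : Mem} {f : Nat}
    (hdi : DecodeInv others frames len A stored room ysz m f) :
    0x400000 ≤ f ∧ f + 1808 ≤ 0xC00000 ∧ (f + 1808 ≤ 0x700000 ∨ 0x800000 ≤ f) ∧ A.B ≤ f ∧ f + 1808 ≤ A.B + A.L := by
  have hoff := hdi.objOff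
  have hr := hdi.fb.vorbis.bits.OBR
  have hrange := hdi.arena.block_range (p := f) (n := Off.sizeof.stb_vorbis) hdi.obj
  have h2 := hdi.arena.AR2
  have hl := le_r8 Off.sizeof.stb_vorbis
  simp only [voff] at hoff hr hrange hl
  omega

/-- **Where the arena is**, as one arithmetic fact: above the image's text, below the shadow, off the stack region. -/
theorem gff_arena_where {others : List Obj} {frames : List (Nat × FrameLayout)} {len : Nat} {A : Arena}
    {stored room : Int} {ysz : Nat → Nat} {m : Mem} {f : Nat}
    (hdi : DecodeInv others frames len A stored room ysz m f) :
    0x119d40 ≤ A.B ∧ A.B + A.L ≤ 0xC00000 ∧ (A.B + A.L ≤ 0x700000 ∨ 0x800000 ≤ A.B) := by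
  have h1 := hdi.arena.AR1
  have h2 := hdi.arena.AR1x
  have h3 : L.textHi ≤ A.B := hdi.arenaText
  have e : L.textHi = 0x119d40 := rfl
  omega


/-- The memory at the call of vorbis_decode_packet (0x119732) over the entry memory `m`: six pushes, two spills, the three
frame header words, the three shadow stores of the prologue, the return address of the call. -/
def gff_prologueMem (m : Mem) (sp : Word) (v15 v14 v13 v12 vbp vbx vsi vdx : Nat) : Mem :=
  ((((((((((((((m.writeLE (sp - 8) 8 v15).writeLE (sp - 16) 8 v14).writeLE (sp - 24) 8 v13).writeLE (sp - 32) 8 v12).writeLE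
    (sp - 40) 8 vbp).writeLE (sp - 48) 8 vbx).writeLE (sp - 176) 8 vsi).writeLE (sp - 168) 8 vdx).writeLE
    (sp - 152) 8 1102416563).writeLE (sp - 144) 8 1183456).writeLE (sp - 136) 8 1152704).writeLE
    ((sp - 152) >>> 3 + 12582912) 4 4059165169).writeLE ((sp - 152) >>> 3 + 12582916) 4 4060410372).writeLE
    ((sp - 152) >>> 3 + 12582920) 4 4092850948).writeLE (sp - 192) 8 1152823

/-- **The nine stack slots after the prologue**, read through the later stores (the three shadow stores among them). Stated
apart from the walk: in the walk's context `u_read` / `u_resolve` fail on the shadow layers (`u_omega` does not bound `x >>> 3`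
inside a disjunctive goal, and gives up with the unit's disjunctive hypotheses around). -/
theorem gff_prologue_slots (m : Mem) (sp r15 r14 r13 r12 rbp rbx rsi rdx ret : Word)
    (hlo : 0x700000 + 4240 ≤ sp.toNat) (hhi : sp.toNat + 8 ≤ 0x800000) (hret : UInt64.ofNat (m.readLE sp 8) = ret) :
    UInt64.ofNat ((gff_prologueMem m sp r15.toNat r14.toNat r13.toNat r12.toNat rbp.toNat rbx.toNat rsi.toNat
      rdx.toNat).readLE (sp - 8) 8) = r15 ∧
    UInt64.ofNat ((gff_prologueMem m sp r15.toNat r14.toNat r13.toNat r12.toNat rbp.toNat rbx.toNat rsi.toNat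
      rdx.toNat).readLE (sp - 16) 8) = r14 ∧
    UInt64.ofNat ((gff_prologueMem m sp r15.toNat r14.toNat r13.toNat r12.toNat rbp.toNat rbx.toNat rsi.toNat
      rdx.toNat).readLE (sp - 24) 8) = r13 ∧
    UInt64.ofNat ((gff_prologueMem m sp r15.toNat r14.toNat r13.toNat r12.toNat rbp.toNat rbx.toNat rsi.toNat
      rdx.toNat).readLE (sp - 32) 8) = r12 ∧
    UInt64.ofNat ((gff_prologueMem m sp r15.toNat r14.toNat r13.toNat r12.toNat rbp.toNat rbx.toNat rsi.toNat
      rdx.toNat).readLE (sp - 40) 8) = rbp ∧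
    UInt64.ofNat ((gff_prologueMem m sp r15.toNat r14.toNat r13.toNat r12.toNat rbp.toNat rbx.toNat rsi.toNat
      rdx.toNat).readLE (sp - 48) 8) = rbx ∧
    UInt64.ofNat ((gff_prologueMem m sp r15.toNat r14.toNat r13.toNat r12.toNat rbp.toNat rbx.toNat rsi.toNat
      rdx.toNat).readLE (sp - 176) 8) = rsi ∧
    UInt64.ofNat ((gff_prologueMem m sp r15.toNat r14.toNat r13.toNat r12.toNat rbp.toNat rbx.toNat rsi.toNat
      rdx.toNat).readLE (sp - 168) 8) = rdx ∧
    UInt64.ofNat ((gff_prologueMem m sp r15.toNat r14.toNat r13.toNat r12.toNat rbp.toNat rbx.toNat rsi.toNat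
      rdx.toNat).readLE sp 8) = ret := by
  have hsa0 : 12582912 ≤ ((sp - 152) >>> 3 + 12582912).toNat ∧ ((sp - 152) >>> 3 + 12582912).toNat + 8 ≤ 14680064 := by
    constructor <;> u_omega
  have hsa4 : 12582912 ≤ ((sp - 152) >>> 3 + 12582916).toNat ∧ ((sp - 152) >>> 3 + 12582916).toNat + 8 ≤ 14680064 := by
    constructor <;> u_omega
  have hsa8 : 12582912 ≤ ((sp - 152) >>> 3 + 12582920).toNat ∧ ((sp - 152) >>> 3 + 12582920).toNat + 8 ≤ 14680064 := by
    constructor <;> u_omega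
  unfold gff_prologueMem
  refine ⟨?_, ?_, ?_, ?_, ?_, ?_, ?_, ?_, ?_⟩
  · have h : ∀ M : Mem, M.readLE (sp - 8) 8 = r15.toNat → UInt64.ofNat (M.readLE (sp - 8) 8) = r15 := by
      intro M hM
      rw [hM]
      exact UInt64.ofNat_toNat
    apply h
    u_read
  · have h : ∀ M : Mem, M.readLE (sp - 16) 8 = r14.toNat → UInt64.ofNat (M.readLE (sp - 16) 8) = r14 := by
      intro M hM
      rw [hM]
      exact UInt64.ofNat_toNat
    apply h
    u_read
  · have h : ∀ M : Mem, M.readLE (sp - 24) 8 = r13.toNat → UInt64.ofNat (M.readLE (sp - 24) 8) = r13 := by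
      intro M hM
      rw [hM]
      exact UInt64.ofNat_toNat
    apply h
    u_read
  · have h : ∀ M : Mem, M.readLE (sp - 32) 8 = r12.toNat → UInt64.ofNat (M.readLE (sp - 32) 8) = r12 := by
      intro M hM
      rw [hM]
      exact UInt64.ofNat_toNat
    apply h
    u_read
  · have h : ∀ M : Mem, M.readLE (sp - 40) 8 = rbp.toNat → UInt64.ofNat (M.readLE (sp - 40) 8) = rbp := by
      intro M hM
      rw [hM]
      exact UInt64.ofNat_toNat
    apply h
    u_read
  · have h : ∀ M : Mem, M.readLE (sp - 48) 8 = rbx.toNat → UInt64.ofNat (M.readLE (sp - 48) 8) = rbx := by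
      intro M hM
      rw [hM]
      exact UInt64.ofNat_toNat
    apply h
    u_read
  · have h : ∀ M : Mem, M.readLE (sp - 176) 8 = rsi.toNat → UInt64.ofNat (M.readLE (sp - 176) 8) = rsi := by
      intro M hM
      rw [hM]
      exact UInt64.ofNat_toNat
    apply h
    u_read
  · have h : ∀ M : Mem, M.readLE (sp - 168) 8 = rdx.toNat → UInt64.ofNat (M.readLE (sp - 168) 8) = rdx := by
      intro M hM
      rw [hM]
      exact UInt64.ofNat_toNat
    apply h
    u_read
  · u_read


/-! ### PART 2. The cut-point assertions (every one is about the entry state `u` and the present state `v`)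

`R` = `u.reg .rsp` (the entry stack pointer: the return address is at `[R]`), `f` = the decoder object (`(u.reg .rdi).toNat`). -/

/-- The frame list inside the function: its own protected frame (base = `R − 152`) in front of the callers'. -/
abbrev ownFrames (u : State) (frames : List (Nat × FrameLayout)) : List (Nat × FrameLayout) :=
  ((u.reg .rsp).toNat - 152, ownFL) :: frames

/-- **What holds at EVERY cut point after the prologue, the epilogue's head included** (steady `rsp` = `R − 184`: six pushes and
`sub rsp, 88H`). The function was entered at `u` by a call (return address `ret`) with its precondition; `f` names the number in
rdi. In the present state `v`: `r14 = (R − 152) >> 3` (the shadow index of the frame's base: `lea r14, [rsp+20H] ; shr r14, 3`,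
never written again; callee-saved), the return address and the six pushed registers in their slots, the footprint so far (= the
contract's: 4240 bytes of stack, the arena, the shadow, `*channels`, `*output`), the text, the ABI invariant, and the shadow layer
and the decode-time invariant FOR THE FRAME LIST WITH THE OWN FRAME (`ownFrames`), the clean stack ending at `R − 184`.
NOT here: `rbx` (`add rbx, 3E8H` at 11985AH destroys it on the way to the epilogue) and the two spilled arguments (not needed by
the epilogue): they are in `GBody`. -/
structure GFrame (others : List Obj) (frames : List (Nat × FrameLayout)) (len : Nat) (A : Arena) (stored room : Int)
    (ysz : Nat → Nat) (u₀ u : State) (ret : Word) (f : Nat) (v : State) : Prop where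
  /-- the function was entered at `u` by a call -/
  entry : AtEntry (conv u₀) L.stb_vorbis_get_frame_float.entry
    (stb_vorbis_get_frame_float.spec others frames len A stored room ysz).frame ret u
  /-- the precondition at the entry (the shadow layer of the CALLERS' list, the invariant in the entry memory, the two
  out-pointers NULL or live stack objects, apart) -/
  pre : (stb_vorbis_get_frame_float.spec others frames len A stored room ysz).pre u
  /-- `f` is the number in rdi at the entry -/
  rdi : (u.reg .rdi).toNat = f
  /-- the steady stack pointer -/
  rsp : v.reg .rsp = u.reg .rsp - 184
  /-- `r14` = the shadow index of the frame's base -/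
  r14 : v.reg .r14 = (u.reg .rsp - 152) >>> 3
  /-- `push r15` -/
  slot_r15 : UInt64.ofNat (v.mem.readLE (u.reg .rsp - 8) 8) = u.reg .r15
  /-- `push r14` -/
  slot_r14 : UInt64.ofNat (v.mem.readLE (u.reg .rsp - 16) 8) = u.reg .r14
  /-- `push r13` -/
  slot_r13 : UInt64.ofNat (v.mem.readLE (u.reg .rsp - 24) 8) = u.reg .r13
  /-- `push r12` -/
  slot_r12 : UInt64.ofNat (v.mem.readLE (u.reg .rsp - 32) 8) = u.reg .r12
  /-- `push rbp` -/
  slot_rbp : UInt64.ofNat (v.mem.readLE (u.reg .rsp - 40) 8) = u.reg .rbp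
  /-- `push rbx` -/
  slot_rbx : UInt64.ofNat (v.mem.readLE (u.reg .rsp - 48) 8) = u.reg .rbx
  /-- the return address -/
  slot_ret : UInt64.ofNat (v.mem.readLE (u.reg .rsp) 8) = ret
  /-- the footprint so far: the contract's (`Spec.footprint` of the Spec at `u`, written out) -/
  same : Mem.SameExcept [⟨(u.reg .rsp).toNat - 4240, (u.reg .rsp).toNat⟩, ⟨A.B, A.B + A.L⟩, ⟨0xC00000, 0xE00000⟩,
    ⟨(u.reg .rsi).toNat, (u.reg .rsi).toNat + 4⟩, ⟨(u.reg .rdx).toNat, (u.reg .rdx).toNat + 8⟩] u.mem v.mem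
  /-- the image's text is unchanged -/
  code : (conv u₀).code.In v.mem
  /-- DF = 0, the six SSE exception masks set -/
  inv : (conv u₀).inv v
  /-- the shadow layer with the own frame in front, the clean stack ending at the steady stack pointer -/
  shadow : ShadowInv others (ownFrames u frames) ((u.reg .rsp).toNat - 184) v.mem
  /-- the decode-time invariant in the present memory, for the list with the own frame -/
  dinv : DecodeInv others (ownFrames u frames) len A stored room ysz v.mem f

/-- **What holds at every cut point of the BODY** (not at the epilogue's head): `GFrame`, `rbx = f`, and the two spilled
arguments in their slots. -/
structure GBody (others : List Obj) (frames : List (Nat × FrameLayout)) (len : Nat) (A : Arena) (stored room : Int)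
    (ysz : Nat → Nat) (u₀ u : State) (ret : Word) (f : Nat) (v : State) : Prop where
  /-- the frame facts -/
  frame : GFrame others frames len A stored room ysz u₀ u ret f v
  /-- `rbx = f` (`mov rbx, rdi` at 1196D1H; written again only at 11985AH, in segment 5) -/
  rbx : v.reg .rbx = u.reg .rdi
  /-- `[rsp + 8] = channels` (`mov [rsp+8], rsi` at 1196D4H) -/
  slot_channels : UInt64.ofNat (v.mem.readLE (u.reg .rsp - 176) 8) = u.reg .rsi
  /-- `[rsp + 10H] = output` (`mov [rsp+10H], rdx` at 1196D9H) -/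
  slot_output : UInt64.ofNat (v.mem.readLE (u.reg .rsp - 168) 8) = u.reg .rdx

/-- **The assertion at `cut1` = 119737H** (after the call of vorbis_decode_packet; `test eax, eax`): the body facts, and W3 for
the three locals `len` `[rsp+40H]` = `R − 120`, `left` `[rsp+60H]` = `R − 88`, `right` `[rsp+50H]` = `R − 104` if eax ≠ 0. -/
structure AtCut1 (others : List Obj) (frames : List (Nat × FrameLayout)) (len : Nat) (A : Arena) (stored room : Int)
    (ysz : Nat → Nat) (u₀ u : State) (ret : Word) (f : Nat) (v : State) : Prop where
  /-- after the call of vorbis_decode_packet -/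
  rip : v.rip = L.stb_vorbis_get_frame_float.cut1
  /-- the body facts -/
  body : GBody others frames len A stored room ysz u₀ u ret f v
  /-- the callee's postcondition about the three locals -/
  w3 : s32 (v.reg .rax) ≠ 0 →
    Top.W3Mem v.mem f ((u.reg .rsp).toNat - 120) ((u.reg .rsp).toNat - 88) ((u.reg .rsp).toNat - 104)

/-- **The assertion at `cut2` = 1197A7H** (after the call of vorbis_finish_frame; `mov [rsp+1CH], eax`): the body facts, and the
result `r` in eax (zero-extended, `r < 2 ^ 31`: `Top.FinishResult` with `FinishPre.result` gives `0 ≤ r`) with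
`left + r ≤ blocksize_1` for `left` = the local `[rsp+60H]` = `R − 88` (`0 ≤ left` from W3; vorbis_finish_frame writes the arena and
stack below `R − 192` only, and `blocksize_1` is none of the decode-time holes). -/
structure AtCut2 (others : List Obj) (frames : List (Nat × FrameLayout)) (len : Nat) (A : Arena) (stored room : Int)
    (ysz : Nat → Nat) (u₀ u : State) (ret : Word) (f left r : Nat) (v : State) : Prop where
  /-- after the call of vorbis_finish_frame -/
  rip : v.rip = L.stb_vorbis_get_frame_float.cut2
  /-- the body facts -/
  body : GBody others frames len A stored room ysz u₀ u ret f v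
  /-- `rax = r`, zero-extended -/
  rax : v.reg .rax = UInt64.ofNat r
  /-- `r` is a non-negative `int` -/
  r_lt : r < 2 ^ 31
  /-- `[rsp + 60H] = left` -/
  slot_left : v.mem.readLE (u.reg .rsp - 88) 4 = left
  /-- `left` is a non-negative `int` -/
  left_lt : left < 2 ^ 31
  /-- `left + r ≤ blocksize_1` (`FinishPre.result`: `left + r ≤ right ≤ b1`) -/
  bound : (left : Int) + (r : Int) ≤ stb_vorbis.blocksize_1 v.mem f

/-- **The assertion at the head `loop1` = 1197F5H of the loop `for (i = 0; i < f->channels; ++i) f->outputs[i] = …`** (`lea rdi,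
[rbx+4]`: the check of `f->channels`), round `i`: the body facts, `r13d = i` (zero-extended), `i ≤ ch` for `ch` = `f->channels` in
the present memory, the two copies of the result `[rsp+1CH]` = `R − 156` and `[rsp+40H]` = `R − 120` (the object `len` of the
protected frame), `[rsp+60H] = left`, `left + r ≤ blocksize_1`, and `outputs[c] = channel_buffers[c] + 4·left` for every `c < i`.
rbp, r12, r15 are dead at the head. -/
structure AtLoop (others : List Obj) (frames : List (Nat × FrameLayout)) (len : Nat) (A : Arena) (stored room : Int)
    (ysz : Nat → Nat) (u₀ u : State) (ret : Word) (f left r ch i : Nat) (v : State) : Prop where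
  /-- at the loop head -/
  rip : v.rip = L.stb_vorbis_get_frame_float.loop1
  /-- the body facts -/
  body : GBody others frames len A stored room ysz u₀ u ret f v
  /-- `r13d = i` (`mov r13d, 0` at 1197AFH, `add r13d, 1` at 1197F1H: the upper half is 0) -/
  r13 : v.reg .r13 = UInt64.ofNat i
  /-- `ch` is `f->channels` in the present memory -/
  chan : stb_vorbis.channels v.mem f = (ch : Int)
  /-- `i ≤ channels` (the loop test at 119801H) -/
  i_le : i ≤ ch
  /-- `[rsp + 1CH] = r` (`mov [rsp+1CH], eax` at 1197A7H) -/
  slot_r : v.mem.readLE (u.reg .rsp - 156) 4 = r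
  /-- `[rsp + 40H] = r` (`mov [rsp+40H], eax` at 1197ABH: `len = vorbis_finish_frame(…)`) -/
  slot_len : v.mem.readLE (u.reg .rsp - 120) 4 = r
  /-- `r` is a non-negative `int` -/
  r_lt : r < 2 ^ 31
  /-- `[rsp + 60H] = left` -/
  slot_left : v.mem.readLE (u.reg .rsp - 88) 4 = left
  /-- `left` is a non-negative `int` -/
  left_lt : left < 2 ^ 31
  /-- `left + r ≤ blocksize_1` -/
  bound : (left : Int) + (r : Int) ≤ stb_vorbis.blocksize_1 v.mem f
  /-- the pointers stored so far -/
  outs : ∀ c : Nat, c < i → stb_vorbis.outputs v.mem f c = stb_vorbis.channel_buffers v.mem f c + 4 * left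

/-- **The assertion at the loop's exit 119806H** (`mov r12d, [rsp+60H]`; label `at_119806`; `ebp = f->channels ≤ i`, so `i = ch`):
as at the head with every `c < channels` done, and `ebp = ch` (zero-extended: `mov ebp, [rbx+4]` at 1197FEH; `*channels = ebp` at
11984DH). r12, r13, r15 are dead. -/
structure AtStores (others : List Obj) (frames : List (Nat × FrameLayout)) (len : Nat) (A : Arena) (stored room : Int)
    (ysz : Nat → Nat) (u₀ u : State) (ret : Word) (f left r ch : Nat) (v : State) : Prop where
  /-- at the loop's exit -/
  rip : v.rip = L.stb_vorbis_get_frame_float.at_119806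
  /-- the body facts -/
  body : GBody others frames len A stored room ysz u₀ u ret f v
  /-- `ebp = f->channels`, zero-extended -/
  rbp : v.reg .rbp = UInt64.ofNat ch
  /-- `ch` is `f->channels` in the present memory -/
  chan : stb_vorbis.channels v.mem f = (ch : Int)
  /-- `[rsp + 1CH] = r` -/
  slot_r : v.mem.readLE (u.reg .rsp - 156) 4 = r
  /-- `[rsp + 40H] = r` -/
  slot_len : v.mem.readLE (u.reg .rsp - 120) 4 = r
  /-- `r` is a non-negative `int` -/
  r_lt : r < 2 ^ 31
  /-- `[rsp + 60H] = left` -/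
  slot_left : v.mem.readLE (u.reg .rsp - 88) 4 = left
  /-- `left` is a non-negative `int` -/
  left_lt : left < 2 ^ 31
  /-- `left + r ≤ blocksize_1` -/
  bound : (left : Int) + (r : Int) ≤ stb_vorbis.blocksize_1 v.mem f
  /-- every pointer is stored -/
  outs : ∀ c : Nat, c < ch → stb_vorbis.outputs v.mem f c = stb_vorbis.channel_buffers v.mem f c + 4 * left

/-- **The assertion at the epilogue's head `at_119769`** (`mov qword [r14+C00000H], 0`; reached from 11975FH with `ebp = 0` — the
zero path — and from 119870H with `ebp = len`): the frame facts, `ebp = r` (zero-extended, a non-negative `int`), and the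
contract's `Top.FrameOut` if `r ≠ 0`. rbx, r12, r13, r15 are dead (popped). -/
structure AtEpi (others : List Obj) (frames : List (Nat × FrameLayout)) (len : Nat) (A : Arena) (stored room : Int)
    (ysz : Nat → Nat) (u₀ u : State) (ret : Word) (f r : Nat) (v : State) : Prop where
  /-- at the epilogue's head -/
  rip : v.rip = L.stb_vorbis_get_frame_float.at_119769
  /-- the frame facts -/
  frame : GFrame others frames len A stored room ysz u₀ u ret f v
  /-- `ebp = r`, zero-extended (`mov ebp, eax` at 11973BH with eax = 0; `mov ebp, [rsp+40H]` at 11986CH) -/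
  rbp : v.reg .rbp = UInt64.ofNat r
  /-- `r` is a non-negative `int` -/
  r_lt : r < 2 ^ 31
  /-- what the contract promises for a non-zero result -/
  out : r ≠ 0 → Top.FrameOut v.mem f (u.reg .rsi).toNat (u.reg .rdx).toNat (r : Int)

/-! ### PART 3. The segments -/

/-- **Segment 1, 1196C0H–119732H** (lines 5098–5102: the prologue — six pushes, `sub rsp, 88H`, two spills, the three frame header
words, the three inline shadow stores: `gff_prologue_inv` —, the call of vorbis_decode_packet with `&len`, `&left`, `&right` live
objects of the own frame, the invariant for the longer frame list by `DecodeInv.carry`): from the function's entry with its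
precondition to `cut1`. -/
def Seg1 (Lay : Layout) (μ : Microarch) (u₀ : State) : Prop :=
  ∀ (others : List Obj) (frames : List (Nat × FrameLayout)) (len : Nat) (A : Arena) (stored room : Int) (ysz : Nat → Nat)
      (u : State) (ret : Word),
    AtEntry (conv u₀) L.stb_vorbis_get_frame_float.entry
      (stb_vorbis_get_frame_float.spec others frames len A stored room ysz).frame ret u →
    (stb_vorbis_get_frame_float.spec others frames len A stored room ysz).pre u →
    ReachVia Lay μ WayInv u (AtCut1 others frames len A stored room ysz u₀ u ret (u.reg .rdi).toNat)

/-- **Segment 2, 119737H–11975FH + 119793H–1197A2H** (lines 5102–5107): from `cut1`, either (eax = 0)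
`f->channel_buffer_start = f->channel_buffer_end = 0` (two checked stores into the decode-time holes `[f+1796, f+1804)`:
`decodeInv_stores`) to the epilogue's head with `r = 0`; or (eax ≠ 0) the three locals loaded, the call of vorbis_finish_frame with
W3′ from `W3Mem` (`Top.W3Mem.w3At`), to `cut2`. -/
def Seg2 (Lay : Layout) (μ : Microarch) (u₀ : State) : Prop :=
  ∀ (others : List Obj) (frames : List (Nat × FrameLayout)) (len : Nat) (A : Arena) (stored room : Int) (ysz : Nat → Nat)
      (u : State) (ret : Word) (f : Nat) (v : State),
    AtCut1 others frames len A stored room ysz u₀ u ret f v →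
    ReachVia Lay μ WayInv v (fun s =>
      (∃ left r : Nat, AtCut2 others frames len A stored room ysz u₀ u ret f left r s) ∨
      AtEpi others frames len A stored room ysz u₀ u ret f 0 s)

/-- **Segment 3, 1197A7H–1197B5H** (lines 5107–5108: `len = …` stored twice, `i = 0`, the jump to the loop's test): from `cut2` to
the loop head with `i = 0`, `ch` = `f->channels` (non-negative: HD1). -/
def Seg3 (Lay : Layout) (μ : Microarch) (u₀ : State) : Prop :=
  ∀ (others : List Obj) (frames : List (Nat × FrameLayout)) (len : Nat) (A : Arena) (stored room : Int) (ysz : Nat → Nat)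
      (u : State) (ret : Word) (f left r : Nat) (v : State),
    AtCut2 others frames len A stored room ysz u₀ u ret f left r v →
    ReachVia Lay μ WayInv v (fun s => ∃ ch : Nat, AtLoop others frames len A stored room ysz u₀ u ret f left r ch 0 s)

/-- **Segment 4, 1197F5H–119804H + 1197B7H–1197F1H** (lines 5108–5109): ONE ROUND of the loop from its head at `i`: the check and
the load of `f->channels`, the test; then (`i < channels`) the body — the checked load of `channel_buffers[i]`, the checked store
of `outputs[i]` (a decode-time hole: `decodeInv_stores`) — back to the head at `i + 1`; or (`i ≥ channels`) the exit 119806H. -/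
def Seg4 (Lay : Layout) (μ : Microarch) (u₀ : State) : Prop :=
  ∀ (others : List Obj) (frames : List (Nat × FrameLayout)) (len : Nat) (A : Arena) (stored room : Int) (ysz : Nat → Nat)
      (u : State) (ret : Word) (f left r ch i : Nat) (v : State),
    AtLoop others frames len A stored room ysz u₀ u ret f left r ch i v →
    ReachVia Lay μ WayInv v (fun s =>
      AtLoop others frames len A stored room ysz u₀ u ret f left r ch (i + 1) s ∨
      AtStores others frames len A stored room ysz u₀ u ret f left r ch s)

/-- **Segment 5, 119806H–119870H** (lines 5111–5116: `f->channel_buffer_start = left; f->channel_buffer_end = left + len;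
if (channels) *channels = f->channels; if (output) *output = f->outputs; return len;`: four checked stores, two of them into
the callers' stack objects, which lie at or above `R + 8`: `LiveIn.above`): from the loop's exit to the epilogue's head with the
result `r`. -/
def Seg5 (Lay : Layout) (μ : Microarch) (u₀ : State) : Prop :=
  ∀ (others : List Obj) (frames : List (Nat × FrameLayout)) (len : Nat) (A : Arena) (stored room : Int) (ysz : Nat → Nat)
      (u : State) (ret : Word) (f left r ch : Nat) (v : State),
    AtStores others frames len A stored room ysz u₀ u ret f left r ch v →
    ReachVia Lay μ WayInv v (AtEpi others frames len A stored room ysz u₀ u ret f r)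

/-- **Segment 6, 119769H–119792H** (the single epilogue: the two inline shadow stores that zero the frame's red zones —
`gff_epilogue_inv` —, `mov eax, ebp`, `add rsp, 88H`, six pops, `ret`; the invariant for the callers' list again by
`DecodeInv.carry`): from the epilogue's head to the state after the `ret`: the contract's `Returned`. -/
def Seg6 (Lay : Layout) (μ : Microarch) (u₀ : State) : Prop :=
  ∀ (others : List Obj) (frames : List (Nat × FrameLayout)) (len : Nat) (A : Arena) (stored room : Int) (ysz : Nat → Nat)
      (u : State) (ret : Word) (f r : Nat) (v : State),
    AtEpi others frames len A stored room ysz u₀ u ret f r v →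
    ReachVia Lay μ WayInv v (Returned (conv u₀) (stb_vorbis_get_frame_float.spec others frames len A stored room ysz) u ret)

end Vorbis.Spec.stb_vorbis_get_frame_float
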